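-- pv_equiv track=rewrite | github.com/NXDuy/Search-Engine | app/search_engine.py | processingQuery
-- ===== SOURCE A (Python) =====
-- def processingQuery(search_query):
--     query = list()
--     word = ""
--     for character in search_query:
--         if character != '*' and character != '?':
--             word += character
--             continue
--
--         if len(word) > 0:
--             query.append(word)
--             word = ""
--
--         query.append(character)
--
--     if len(word) > 0:
--         query.append(word)
--
--     return query
-- ===== SOURCE B (Python) =====
-- def processingQuery(search_query):
--     tokens = []
--     i = 0
--     n = len(search_query)
--     while i < n:
--         if search_query[i] == '*' or search_query[i] == '?':
--             tokens.append(search_query[i])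
--             i += 1
--         else:
--             j = i + 1
--             while j < n and search_query[j] != '*' and search_query[j] != '?':
--                 j += 1
--             tokens.append(search_query[i:j])
--             i = j
--     return tokens
-- ===== Notes on version B (the rewrite author's own statement) =====
-- stated objective: alternative
-- what changed: Replaces the char-by-char loop with a word accumulation buffer and flush logic by an index-based run scanner: each maximal non-wildcard run is located with an inner index advance and emitted as one slice, wildcards as single-char tokens; no buffer is maintained.
import Mathlib
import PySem

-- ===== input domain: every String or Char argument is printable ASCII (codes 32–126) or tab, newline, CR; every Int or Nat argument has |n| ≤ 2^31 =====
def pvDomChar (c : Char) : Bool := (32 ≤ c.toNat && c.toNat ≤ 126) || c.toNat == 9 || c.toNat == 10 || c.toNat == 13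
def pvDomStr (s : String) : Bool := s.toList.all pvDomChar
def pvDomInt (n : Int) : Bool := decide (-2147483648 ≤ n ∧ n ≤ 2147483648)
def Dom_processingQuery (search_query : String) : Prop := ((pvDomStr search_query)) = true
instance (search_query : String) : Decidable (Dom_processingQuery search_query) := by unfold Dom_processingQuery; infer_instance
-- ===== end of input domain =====

-- B replaces A's char-by-char buffer-and-flush loop by an index/run scanner emitting slices (objective: alternative, same cost).

-- ===== PORT A =====
-- state: (query so far, current word as List Char — Python's str buffer, flushed via String.ofList)
def pqStepA (st : List String × List Char) (c : Char) : List String × List Char :=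
  if c ≠ '*' ∧ c ≠ '?' then (st.1, st.2 ++ [c])
  else ((st.1 ++ (if st.2.length > 0 then [String.ofList st.2] else []) ++ [String.ofList [c]]), [])

def processingQuery (search_query : String) : List String :=
  let st := search_query.toList.foldl pqStepA ([], [])
  st.1 ++ (if st.2.length > 0 then [String.ofList st.2] else [])

-- ===== PORT B =====
-- Source B's inner `while j < n and s[j] != '*' and s[j] != '?'` advance = takeWhile/dropWhile on the rest;
-- the slice s[i:j] is the scanned run.
def pqNonWild (c : Char) : Bool := c ≠ '*' ∧ c ≠ '?'

def pqScan : List Char → List String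
  | [] => []
  | c :: rest =>
    if c = '*' ∨ c = '?' then String.ofList [c] :: pqScan rest
    else String.ofList (c :: rest.takeWhile pqNonWild) :: pqScan (rest.dropWhile pqNonWild)
termination_by l => l.length
decreasing_by
  · simp
  · exact Nat.lt_succ_of_le (rest.length_dropWhile_le pqNonWild)

def processingQuery_alt (search_query : String) : List String :=
  pqScan search_query.toList

-- ===== PRECONDITION & SPEC =====
def Spec_processingQuery (search_query : String) (out : List String) : Prop := out = processingQuery_alt search_query
instance (search_query : String) (out : List String) : Decidable (Spec_processingQuery search_query out) := by unfold Spec_processingQuery; infer_instance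

-- ===== CLAIM (what is proved, stated in full; the proofs are below) =====
def Claim_equal_processingQuery : Prop := ∀ (search_query : String), Dom_processingQuery search_query → Spec_processingQuery search_query (processingQuery search_query)

-- ===== LEMMAS AND PROOFS =====

def pqFinish (st : List String × List Char) : List String :=
  st.1 ++ (if st.2.length > 0 then [String.ofList st.2] else [])

-- A's loop over a run of non-wildcard chars only extends the word buffer.
lemma pqFold_run (t : List Char) (h : ∀ x ∈ t, pqNonWild x = true) :
    ∀ (acc : List String) (word : List Char),
      t.foldl pqStepA (acc, word) = (acc, word ++ t) := by
  induction t with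
  | nil => intro acc word; simp
  | cons c t ih =>
    intro acc word
    have hc : c ≠ '*' ∧ c ≠ '?' := by
      have := h c (by simp)
      simpa [pqNonWild] using this
    simp only [List.foldl_cons, pqStepA, if_pos hc]
    rw [ih (fun x hx => h x (by simp [hx]))]
    simp

lemma pqKey (l : List Char) : ∀ (acc : List String),
    pqFinish (l.foldl pqStepA (acc, [])) = acc ++ pqScan l := by
  fun_induction pqScan l with
  | case1 => intro acc; simp [pqFinish]
  | case2 c rest hw ih =>
    intro acc
    have hc : ¬ (c ≠ '*' ∧ c ≠ '?') := by tauto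
    simp only [List.foldl_cons, pqStepA, if_neg hc]
    rw [ih]
    simp
  | case3 c rest hw ih =>
    intro acc
    have hc : c ≠ '*' ∧ c ≠ '?' := by tauto
    have hdecomp : rest = rest.takeWhile pqNonWild ++ rest.dropWhile pqNonWild :=
      (rest.takeWhile_append_dropWhile).symm
    have hrun : ∀ x ∈ rest.takeWhile pqNonWild, pqNonWild x = true :=
      fun x hx => List.mem_takeWhile_imp hx
    simp only [List.foldl_cons, pqStepA, if_pos hc]
    conv_lhs => rw [hdecomp, List.foldl_append]
    rw [show ((acc, ([] : List Char) ++ [c])) = ((acc, [c]) : List String × List Char) by simp,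
        pqFold_run _ hrun]
    -- now fold over the tail after the run; its head (if any) is a wildcard
    cases hrest : rest.dropWhile pqNonWild with
    | nil => simp [pqFinish, pqScan]
    | cons w rest' =>
      have hwild : ¬ (w ≠ '*' ∧ w ≠ '?') := by
        have hhead : pqNonWild w = false := by
          have := List.head?_dropWhile_not pqNonWild rest
          rw [hrest] at this
          simpa using this
        simp [pqNonWild] at hhead
        tauto
      -- take one step of A's loop (flushing the run and emitting the wildcard) on both sides
      simp only [List.foldl_cons, pqStepA, if_neg hwild]
      have ih' := ih (acc ++ [String.ofList (c :: rest.takeWhile pqNonWild)])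
      rw [hrest] at ih'
      simp only [List.foldl_cons, pqStepA, if_neg hwild] at ih'
      rw [show (([c] ++ rest.takeWhile pqNonWild : List Char)) = (c :: rest.takeWhile pqNonWild) by simp]
      simp only [List.length_cons, if_pos (Nat.succ_pos _)]
      simpa using ih'

-- ===== VERDICT (by name: the statement is the Claim_ definition above) =====
theorem processingQuery_spec : Claim_equal_processingQuery := by
  intro s _
  unfold Spec_processingQuery processingQuery processingQuery_alt
  simpa [pqFinish] using pqKey s.toList []
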